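-- pv_equiv track=rewrite | github.com/mohavinash/delhi-excise-case-explainer | generate_annotated.py | _find_sequence_start
-- ===== SOURCE A (Python) =====
-- def _find_sequence_start(page_words_norm, target_words, max_scan=None):
--     """Find where target_words starts in page_words_norm. Returns index or None."""
--     limit = len(page_words_norm)
--     if max_scan is not None:
--         limit = min(limit, max_scan)
--     for search_len in (5, 4, 3):
--         if search_len > len(target_words):
--             continue
--         target = target_words[:search_len]
--         for i in range(limit - search_len + 1):
--             if all(page_words_norm[i + j] == target[j] for j in range(search_len)):
--                 return i
--     return None
-- ===== SOURCE B (Python) =====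
-- def _find_sequence_start(page_words_norm, target_words, max_scan=None):
--     """Find where target_words starts in page_words_norm. Returns index or None."""
--     limit = len(page_words_norm)
--     if max_scan is not None:
--         limit = min(limit, max_scan)
--     best_i = None
--     best_len = 2
--     for i in range(limit):
--         cap = min(5, len(target_words), limit - i)
--         L = 0
--         while L < cap and page_words_norm[i + L] == target_words[L]:
--             L += 1
--         if L > best_len:
--             best_len = L
--             best_i = i
--     return best_i
-- ===== Notes on version B (the rewrite author's own statement) =====
-- stated objective: faster
-- what changed: Replaces A's three length-indexed scans (prefix length 5, then 4, then 3, each re-scanning the page with a per-position generator) by one left-to-right pass that computes the consecutive-match length at each position (capped at min(5, len(target_words), limit - i)) and keeps the longest match, ties to the smallest index.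
import Mathlib
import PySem

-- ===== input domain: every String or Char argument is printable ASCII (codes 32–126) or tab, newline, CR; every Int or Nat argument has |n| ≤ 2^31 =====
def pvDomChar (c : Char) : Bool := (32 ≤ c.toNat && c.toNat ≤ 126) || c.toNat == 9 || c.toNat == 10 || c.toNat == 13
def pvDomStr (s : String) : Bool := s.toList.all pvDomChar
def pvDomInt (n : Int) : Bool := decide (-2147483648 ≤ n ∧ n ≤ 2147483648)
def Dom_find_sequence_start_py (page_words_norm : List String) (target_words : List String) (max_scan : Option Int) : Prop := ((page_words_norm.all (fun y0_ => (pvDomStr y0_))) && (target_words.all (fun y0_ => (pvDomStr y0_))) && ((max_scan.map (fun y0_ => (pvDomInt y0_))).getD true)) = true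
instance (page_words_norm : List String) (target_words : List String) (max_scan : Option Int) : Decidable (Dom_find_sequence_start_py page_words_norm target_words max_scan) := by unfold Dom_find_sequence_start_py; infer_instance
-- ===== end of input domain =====

-- B replaces A's three length-indexed scans (prefix lengths 5, 4, 3) by ONE pass that keeps
-- the longest consecutive-match length (ties to the smallest index); objective: faster by a constant factor.

-- ===== PORT A =====
-- limit = len(page); if max_scan is not None: limit = min(limit, max_scan)
def pvLimit (page_words_norm : List String) (max_scan : Option Int) : Int :=
  match max_scan with
  | none => (page_words_norm.length : Int)
  | some m => min ((page_words_norm.length : Int)) m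

-- all(page_words_norm[i + j] == target[j] for j in range(search_len))
def pvAllEq (page target : List String) (i sl : Int) : Bool :=
  (PySem.List.pyRange 0 sl 1).all
    (fun j => PySem.List.pyGet? page (i + j) == PySem.List.pyGet? target j)

-- one iteration of A's outer loop: skip if search_len > len(target); else scan range(limit - sl + 1)
def pvTry (page t : List String) (limit sl : Int) : Option Int :=
  if sl > (t.length : Int) then none
  else
    (PySem.List.pyRange 0 (limit - sl + 1) 1).find?
      (fun i => pvAllEq page (PySem.List.slice t none (some sl)) i sl)

def find_sequence_start_py (page_words_norm : List String) (target_words : List String) (max_scan : Option Int) : Option Int :=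
  let limit := pvLimit page_words_norm max_scan
  match pvTry page_words_norm target_words limit 5 with
  | some i => some i
  | none =>
    match pvTry page_words_norm target_words limit 4 with
    | some i => some i
    | none => pvTry page_words_norm target_words limit 3

-- ===== PORT B =====
-- while L < cap and page[i + L] == target[L]: L += 1     (fuel = cap - L)
def pvMatchLen (p t : List String) (i : Int) : Nat → Int → Int
  | 0, L => L
  | Nat.succ c, L =>
    if PySem.List.pyGet? p (i + L) == PySem.List.pyGet? t L
    then pvMatchLen p t i c (L + 1) else L

def find_sequence_start_py_alt (page_words_norm : List String) (target_words : List String) (max_scan : Option Int) : Option Int :=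
  let limit := pvLimit page_words_norm max_scan
  ((PySem.List.pyRange 0 limit 1).foldl
    (fun st i =>
      let cap := (min 5 (min (target_words.length : Int) (limit - i))).toNat
      let L := pvMatchLen page_words_norm target_words i cap 0
      if L > st.2 then (some i, L) else st)
    ((none : Option Int), (2 : Int))).1

-- ===== PRECONDITION & SPEC =====
def Spec_find_sequence_start_py (page_words_norm : List String) (target_words : List String) (max_scan : Option Int) (out : Option Int) : Prop := out = find_sequence_start_py_alt page_words_norm target_words max_scan
instance (page_words_norm : List String) (target_words : List String) (max_scan : Option Int) (out : Option Int) : Decidable (Spec_find_sequence_start_py page_words_norm target_words max_scan out) := by unfold Spec_find_sequence_start_py; infer_instance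

-- ===== CLAIM (what is proved, stated in full; the proofs are below) =====
def Claim_equal_find_sequence_start_py : Prop := ∀ (page_words_norm : List String) (target_words : List String) (max_scan : Option Int), Dom_find_sequence_start_py page_words_norm target_words max_scan → Spec_find_sequence_start_py page_words_norm target_words max_scan (find_sequence_start_py page_words_norm target_words max_scan)

-- ===== LEMMAS AND PROOFS =====

-- B's per-position match length
def pvFI (p t : List String) (limit i : Int) : Int :=
  pvMatchLen p t i ((min 5 (min (t.length : Int) (limit - i))).toNat) 0

-- the words of p starting at i agree with the first K words of t
def pvAgree (p t : List String) (i K : Int) : Prop :=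
  ∀ j : Int, 0 ≤ j → j < K → PySem.List.pyGet? p (i + j) = PySem.List.pyGet? t j

theorem pvMatchLen_lb (p t : List String) (i : Int) :
    ∀ (c : Nat) (L : Int), L ≤ pvMatchLen p t i c L := by
  intro c
  induction c with
  | zero => intro L; simp [pvMatchLen]
  | succ c ih =>
      intro L
      simp only [pvMatchLen]
      split
      · exact le_trans (by omega) (ih (L + 1))
      · exact le_refl L

theorem pvMatchLen_ub (p t : List String) (i : Int) :
    ∀ (c : Nat) (L : Int), pvMatchLen p t i c L ≤ L + c := by
  intro c
  induction c with
  | zero => intro L; simp [pvMatchLen]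
  | succ c ih =>
      intro L
      simp only [pvMatchLen]
      split
      · have := ih (L + 1); push_cast; push_cast at this; omega
      · push_cast; omega

theorem pvMatchLen_ge_iff_aux (p t : List String) (i : Int) :
    ∀ (c : Nat) (L : Int) (k : Nat), k ≤ c →
      ((L + k ≤ pvMatchLen p t i c L) ↔
        ∀ j : Int, 0 ≤ j → j < (k : Int) →
          PySem.List.pyGet? p (i + L + j) = PySem.List.pyGet? t (L + j)) := by
  intro c
  induction c with
  | zero =>
      intro L k hk
      have hk0 : k = 0 := by omega
      subst hk0
      constructor
      · intro _ j h0 hlt; exact absurd hlt (by omega)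
      · intro _; simp [pvMatchLen]
  | succ c ih =>
      intro L k hk
      cases k with
      | zero =>
          constructor
          · intro _ j h0 hlt; exact absurd hlt (by omega)
          · intro _
            have := pvMatchLen_lb p t i (c + 1) L
            push_cast; omega
      | succ k' =>
          simp only [pvMatchLen]
          by_cases hhd : PySem.List.pyGet? p (i + L) = PySem.List.pyGet? t L
          · rw [if_pos (by simp [hhd])]
            have ihh := ih (L + 1) k' (by omega)
            constructor
            · intro hle j h0 hlt
              by_cases hj : j = 0
              · subst hj; simpa using hhd
              · have hle' : (L + 1) + (k' : Int) ≤ pvMatchLen p t i c (L + 1) := by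
                  push_cast at hle; omega
                have hx := ihh.mp hle' (j - 1) (by omega) (by push_cast at hlt ⊢; omega)
                have e1 : i + (L + 1) + (j - 1) = i + L + j := by ring
                have e2 : (L + 1) + (j - 1) = L + j := by ring
                rwa [e1, e2] at hx
            · intro hall
              have hall' : ∀ j : Int, 0 ≤ j → j < (k' : Int) →
                  PySem.List.pyGet? p (i + (L + 1) + j) = PySem.List.pyGet? t ((L + 1) + j) := by
                intro j h0 hlt
                have hx := hall (j + 1) (by omega) (by push_cast; omega)
                have e1 : i + L + (j + 1) = i + (L + 1) + j := by ring
                have e2 : L + (j + 1) = (L + 1) + j := by ring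
                rwa [e1, e2] at hx
              have := ihh.mpr hall'
              push_cast at this ⊢; omega
          · rw [if_neg (by simpa using hhd)]
            constructor
            · intro h; exfalso
              have := pvMatchLen_lb p t i 0 L
              push_cast at h; omega
            · intro hall; exact absurd (by simpa using hall 0 le_rfl (by push_cast; omega)) hhd

theorem pvFI_ge_iff (p t : List String) (limit i : Int) (K : Int)
    (h0 : 0 ≤ K) (hK : K ≤ min 5 (min (t.length : Int) (limit - i))) :
    (K ≤ pvFI p t limit i) ↔ pvAgree p t i K := by
  have hmin : 0 ≤ min 5 (min (t.length : Int) (limit - i)) := le_trans h0 hK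
  have hc : (((min 5 (min (t.length : Int) (limit - i))).toNat : Nat) : Int)
      = min 5 (min (t.length : Int) (limit - i)) := Int.toNat_of_nonneg hmin
  have hKt : ((K.toNat : Nat) : Int) = K := Int.toNat_of_nonneg h0
  have haux := pvMatchLen_ge_iff_aux p t i ((min 5 (min (t.length : Int) (limit - i))).toNat)
      0 K.toNat (by omega)
  rw [hKt] at haux
  simp only [zero_add, add_zero] at haux
  unfold pvFI pvAgree
  exact haux

theorem pvFI_ub (p t : List String) (limit i : Int) :
    pvFI p t limit i ≤ ((min 5 (min (t.length : Int) (limit - i))).toNat : Int) := by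
  have := pvMatchLen_ub p t i ((min 5 (min (t.length : Int) (limit - i))).toNat) 0
  unfold pvFI
  omega

theorem pvAllEq_iff (p t : List String) (i sl : Int) :
    (pvAllEq p (PySem.List.slice t none (some sl)) i sl = true) ↔
      (∀ j : Int, 0 ≤ j → j < sl →
        PySem.List.pyGet? p (i + j) = PySem.List.pyGet? (PySem.List.slice t none (some sl)) j) := by
  unfold pvAllEq
  rw [List.all_eq_true]
  constructor
  · intro h j h0j hlt
    have := h j (by rw [PySem.List.mem_pyRange_one]; exact ⟨h0j, hlt⟩)
    simpa using this
  · intro h j hj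
    rw [PySem.List.mem_pyRange_one] at hj
    simpa using h j hj.1 hj.2

theorem pvAllEq_agree (p t : List String) (i sl : Int) (h0 : 0 ≤ sl) :
    (pvAllEq p (PySem.List.slice t none (some sl)) i sl = true) ↔ pvAgree p t i sl := by
  rw [pvAllEq_iff p t i sl]
  have hsl' : ∀ j : Int, 0 ≤ j → j < sl →
      PySem.List.pyGet? (PySem.List.slice t none (some sl)) j = PySem.List.pyGet? t j := by
    intro j h0j hlt
    rw [PySem.List.slice_to t h0, PySem.List.pyGet?_of_nonneg _ h0j, PySem.List.pyGet?_of_nonneg _ h0j]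
    exact List.getElem?_take_of_lt (by omega)
  unfold pvAgree
  constructor <;> intro h j h0j hlt <;> have hx := h j h0j hlt
  · rwa [hsl' j h0j hlt] at hx
  · rwa [hsl' j h0j hlt]

-- the running best-(index,length) fold is an argmax: final length is the running max,
-- final index the first position attaining it (when it beats the initial value)
theorem pvFoldBest (f : Int → Int) :
    ∀ (is : List Int) (b : Option Int) (m : Int),
      is.foldl (fun st i => if f i > st.2 then (some i, f i) else st) (b, m)
      = (if m < is.foldl (fun a i => max a (f i)) m
           then is.find? (fun i => f i == is.foldl (fun a i => max a (f i)) m)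
           else b,
         is.foldl (fun a i => max a (f i)) m) := by
  intro is
  induction is with
  | nil => intro b m; simp
  | cons i is ih =>
      intro b m
      simp only [List.foldl_cons]
      by_cases h : f i > m
      · rw [if_pos h]
        rw [ih (some i) (f i)]
        have hmx : max m (f i) = f i := max_eq_right (le_of_lt h)
        rw [hmx]
        have hfle : f i ≤ is.foldl (fun a i => max a (f i)) (f i) :=
          (PySem.List.le_foldl_max_int is f (f i)).1
        have hmlt : m < is.foldl (fun a i => max a (f i)) (f i) := lt_of_lt_of_le h hfle
        rw [if_pos hmlt]
        by_cases h2 : f i < is.foldl (fun a i => max a (f i)) (f i)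
        · rw [if_pos h2]
          rw [List.find?_cons_of_neg (by simp; omega)]
        · rw [if_neg h2]
          have : f i = is.foldl (fun a i => max a (f i)) (f i) := le_antisymm hfle (by omega)
          rw [List.find?_cons_of_pos (by simp [this.symm])]
      · rw [if_neg h]
        rw [ih b m]
        have hmx : max m (f i) = m := max_eq_left (by omega)
        rw [hmx]
        by_cases h2 : m < is.foldl (fun a i => max a (f i)) m
        · rw [if_pos h2, if_pos h2]
          rw [List.find?_cons_of_neg (by simp; omega)]
        · rw [if_neg h2, if_neg h2]

theorem pvFind?_congr {α : Type} (l : List α) (pq : α → Bool) (q : α → Bool)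
    (h : ∀ x ∈ l, pq x = q x) : l.find? pq = l.find? q := by
  induction l with
  | nil => rfl
  | cons a l ih =>
      have ha := h a (List.mem_cons_self)
      by_cases hp : pq a = true
      · rw [List.find?_cons_of_pos hp, List.find?_cons_of_pos (ha ▸ hp)]
      · rw [List.find?_cons_of_neg hp, List.find?_cons_of_neg (ha ▸ hp)]
        exact ih (fun x hx => h x (List.mem_cons_of_mem a hx))

theorem pvMain (p t : List String) (limit : Int) :
    (match pvTry p t limit 5 with
     | some i => some i
     | none =>
       match pvTry p t limit 4 with
       | some i => some i
       | none => pvTry p t limit 3)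
    = ((PySem.List.pyRange 0 limit 1).foldl
        (fun st i =>
          let cap := (min 5 (min (t.length : Int) (limit - i))).toNat
          let L := pvMatchLen p t i cap 0
          if L > st.2 then (some i, L) else st)
        ((none : Option Int), (2 : Int))).1 := by
  have key :
      (match pvTry p t limit 5 with
       | some i => some i
       | none =>
         match pvTry p t limit 4 with
         | some i => some i
         | none => pvTry p t limit 3)
      = ((PySem.List.pyRange 0 limit 1).foldl
          (fun st i => if pvFI p t limit i > st.2 then (some i, pvFI p t limit i) else st)
          ((none : Option Int), (2 : Int))).1 := by
    rw [pvFoldBest (pvFI p t limit) (PySem.List.pyRange 0 limit 1) none 2]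
    set M := (PySem.List.pyRange 0 limit 1).foldl (fun a i => max a (pvFI p t limit i)) 2 with hM
    have hlb := (PySem.List.le_foldl_max_int (PySem.List.pyRange 0 limit 1) (pvFI p t limit) 2)
    have hM2 : 2 ≤ M := hlb.1
    have hub : ∀ i ∈ PySem.List.pyRange 0 limit 1, pvFI p t limit i ≤ M := hlb.2
    have hf5 : ∀ i : Int, pvFI p t limit i ≤ 5 := by
      intro i
      have h1 := pvFI_ub p t limit i
      have h2 : min 5 (min (t.length : Int) (limit - i)) ≤ 5 := min_le_left _ _
      omega
    have hMcases : M = 2 ∨ ∃ i ∈ PySem.List.pyRange 0 limit 1, pvFI p t limit i = M := by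
      have hmap : M = ((PySem.List.pyRange 0 limit 1).map (pvFI p t limit)).foldl max 2 := by
        rw [hM, List.foldl_map]
      rcases PySem.List.foldl_max_mem ((PySem.List.pyRange 0 limit 1).map (pvFI p t limit)) 2 with h | h
      · left; rw [hmap, h]
      · right
        rcases List.mem_map.mp h with ⟨i, hi, hfi⟩
        exact ⟨i, hi, by rw [hmap]; exact hfi⟩
    have hM5 : M ≤ 5 := by
      rcases hMcases with h | ⟨i, _, hfi⟩
      · omega
      · rw [← hfi]; exact hf5 i
    have booleq : ∀ a b : Bool, (a = true ↔ b = true) → a = b := by decide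
    have agree_le : ∀ sl : Int, 3 ≤ sl → sl ≤ 5 → sl ≤ (t.length : Int) →
        ∀ i : Int, 0 ≤ i → i + sl ≤ limit →
        ((pvAllEq p (PySem.List.slice t none (some sl)) i sl = true) ↔ sl ≤ pvFI p t limit i) := by
      intro sl h3 h5 ht i h0 hil
      rw [pvAllEq_agree p t i sl (by omega)]
      exact (pvFI_ge_iff p t limit i sl (by omega)
        (le_min (by omega) (le_min ht (by omega)))).symm
    have try_none : ∀ sl : Int, 3 ≤ sl → sl ≤ 5 → M < sl → pvTry p t limit sl = none := by
      intro sl h3 h5 hMlt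
      unfold pvTry
      by_cases htl : sl > (t.length : Int)
      · rw [if_pos htl]
      · rw [if_neg htl]
        apply List.find?_eq_none.mpr
        intro i hi hpred
        rw [PySem.List.mem_pyRange_one] at hi
        have hge : sl ≤ pvFI p t limit i :=
          (agree_le sl h3 h5 (by omega) i hi.1 (by omega)).mp hpred
        have hle := hub i (by rw [PySem.List.mem_pyRange_one]; exact ⟨hi.1, by omega⟩)
        omega
    -- in the attained cases, M fits within target length and limit
    have hbounds : ∀ i : Int, 0 ≤ i → pvFI p t limit i = M →
        M ≤ (t.length : Int) ∧ M ≤ limit := by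
      intro i h0 hfi
      have h1 := pvFI_ub p t limit i
      have e1 : min 5 (min (t.length : Int) (limit - i)) ≤ min (t.length : Int) (limit - i) :=
        min_le_right _ _
      have e2 : min (t.length : Int) (limit - i) ≤ (t.length : Int) := min_le_left _ _
      have e3 : min (t.length : Int) (limit - i) ≤ limit - i := min_le_right _ _
      constructor <;> omega
    have try_eq : M ≤ (t.length : Int) → M ≤ limit → 3 ≤ M →
        pvTry p t limit M
          = (PySem.List.pyRange 0 limit 1).find? (fun i => pvFI p t limit i == M) := by
      intro hMt hMlim hM3
      unfold pvTry
      rw [if_neg (by omega)]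
      rw [PySem.List.pyRange_one_append 0 (limit - M + 1) limit (by omega) (by omega)]
      rw [List.find?_append]
      have h2nd : (PySem.List.pyRange (limit - M + 1) limit).find?
          (fun i => pvFI p t limit i == M) = none := by
        apply List.find?_eq_none.mpr
        intro i hi hpred
        rw [PySem.List.mem_pyRange_one] at hi
        have h1 := pvFI_ub p t limit i
        have e1 : min 5 (min (t.length : Int) (limit - i)) ≤ min (t.length : Int) (limit - i) :=
          min_le_right _ _
        have e3 : min (t.length : Int) (limit - i) ≤ limit - i := min_le_right _ _
        have hfi : pvFI p t limit i = M := by simpa using hpred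
        omega
      rw [h2nd, Option.or_none]
      apply pvFind?_congr
      intro i hi
      rw [PySem.List.mem_pyRange_one] at hi
      have hiff := agree_le M (by omega) (by omega) hMt i hi.1 (by omega)
      have hle := hub i (by rw [PySem.List.mem_pyRange_one]; exact ⟨hi.1, by omega⟩)
      apply booleq
      rw [hiff]
      constructor
      · intro h; simp only [beq_iff_eq]; omega
      · intro h; simp only [beq_iff_eq] at h; omega
    have hMor : M = 2 ∨ M = 3 ∨ M = 4 ∨ M = 5 := by omega
    rcases hMor with h2 | h3 | h4 | h5
    · rw [try_none 5 (by omega) (by omega) (by omega),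
          try_none 4 (by omega) (by omega) (by omega),
          try_none 3 (by omega) (by omega) (by omega)]
      rw [if_neg (by omega)]
    · rw [try_none 5 (by omega) (by omega) (by omega),
          try_none 4 (by omega) (by omega) (by omega)]
      rcases hMcases with hc | ⟨i0, hi0, hfi0⟩
      · omega
      · rw [PySem.List.mem_pyRange_one] at hi0
        have hb := hbounds i0 hi0.1 hfi0
        have he := try_eq hb.1 hb.2 (by omega)
        rw [h3] at he
        rw [he, if_pos (by omega), ← h3]
    · rcases hMcases with hc | ⟨i0, hi0, hfi0⟩
      · omega
      · have hi0' := hi0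
        rw [PySem.List.mem_pyRange_one] at hi0'
        have hb := hbounds i0 hi0'.1 hfi0
        have he := try_eq hb.1 hb.2 (by omega)
        have hsome : ((PySem.List.pyRange 0 limit 1).find?
            (fun i => pvFI p t limit i == M)).isSome := by
          rw [List.find?_isSome]
          exact ⟨i0, hi0, by simp [hfi0]⟩
        obtain ⟨jj, hjj⟩ := Option.isSome_iff_exists.mp hsome
        rw [try_none 5 (by omega) (by omega) (by omega)]
        rw [if_pos (by omega), hjj]
        rw [h4] at he hjj
        rw [he, hjj]
    · rcases hMcases with hc | ⟨i0, hi0, hfi0⟩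
      · omega
      · have hi0' := hi0
        rw [PySem.List.mem_pyRange_one] at hi0'
        have hb := hbounds i0 hi0'.1 hfi0
        have he := try_eq hb.1 hb.2 (by omega)
        have hsome : ((PySem.List.pyRange 0 limit 1).find?
            (fun i => pvFI p t limit i == M)).isSome := by
          rw [List.find?_isSome]
          exact ⟨i0, hi0, by simp [hfi0]⟩
        obtain ⟨jj, hjj⟩ := Option.isSome_iff_exists.mp hsome
        rw [if_pos (by omega), hjj]
        rw [h5] at he hjj
        rw [he, hjj]
  exact key

-- ===== VERDICT (by name: the statement is the Claim_ definition above) =====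
theorem find_sequence_start_py_spec : Claim_equal_find_sequence_start_py := by
  intro p t ms _
  unfold Spec_find_sequence_start_py find_sequence_start_py find_sequence_start_py_alt
  exact pvMain p t (pvLimit p ms)
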